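-- pv_equiv track=rewrite | github.com/nioliu/algorithm-python | tiktok/Prefix Scroes.py | getPrefixScores2
-- ===== SOURCE A (Python) =====
-- base = pow(10, 9) + 7
--
-- def getPrefixScores2(arr):
--     res = []
--     for i in range(len(arr)):
--         currNums = arr[:i + 1]
--         currMaxV = max(currNums)
--         for j in range(i + 1):
--             currNums[j] += currMaxV
--             # if curr sum greater than the max, then replace it
--             currMaxV = max(currNums[j], currMaxV)
--         res.append(sum(currNums) % base)
--     return res
-- ===== SOURCE B (Python) =====
-- base = pow(10, 9) + 7
--
-- def getPrefixScores2(arr):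
--     # O(n) one pass: inside A's inner loop the running max obeys
--     # max(arr[j]+m, m) = m + max(arr[j], 0), so prefix i contributes
--     # sum(prefix) + (i+1)*max(prefix) + sum of positive-part prefix sums.
--     res = []
--     m = None   # running max of the prefix
--     s = 0      # running sum of the prefix
--     p = 0      # sum of max(v, 0) over the prefix
--     t = 0      # sum over j <= i of p-before-step-j
--     for i, x in enumerate(arr):
--         m = x if m is None else max(m, x)
--         s += x
--         t += p
--         p += max(x, 0)
--         res.append((s + (i + 1) * m + t) % base)
--     return res
-- ===== Notes on version B (the rewrite author's own statement) =====
-- stated objective: faster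
-- what changed: Replaced the per-prefix rebuild (slice, max, and an inner mutation loop for every i) with a single left-to-right pass maintaining running max, running sum, running positive-part sum and its running total, using the identity max(v+m,m)=m+max(v,0) to get a closed form per prefix.
import Mathlib
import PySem

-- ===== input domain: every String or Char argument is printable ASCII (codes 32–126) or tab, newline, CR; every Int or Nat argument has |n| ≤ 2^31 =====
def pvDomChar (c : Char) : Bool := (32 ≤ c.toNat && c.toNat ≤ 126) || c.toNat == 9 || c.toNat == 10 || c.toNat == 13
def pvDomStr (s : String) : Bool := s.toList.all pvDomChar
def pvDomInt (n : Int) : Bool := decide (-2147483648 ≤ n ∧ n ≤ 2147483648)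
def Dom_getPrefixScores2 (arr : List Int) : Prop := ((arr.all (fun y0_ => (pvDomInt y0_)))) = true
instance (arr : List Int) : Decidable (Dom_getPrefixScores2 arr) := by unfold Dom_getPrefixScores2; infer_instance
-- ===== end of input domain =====

-- B replaces A's per-prefix rebuild (slice + max + inner mutation loop for every i) with one
-- left-to-right pass maintaining running max / sum / positive-part sums (objective: faster).

-- module constant: base = pow(10, 9) + 7
def pvBase : Int := 1000000007

-- ===== PORT A =====
-- literal transliteration of A: for each i, slice the prefix, take its max,
-- then the inner loop mutates the slice in place while updating the running max.
def getPrefixScores2 (arr : List Int) : List Int :=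
  (PySem.List.pyRange 0 (arr.length : Int) 1).foldl (fun res i =>
    let currNums := PySem.List.slice arr none (some (i + 1))
    -- max(currNums): the prefix is nonempty for every i in range, so the getD 0 default is never used
    let currMaxV := (PySem.List.max? currNums (fun x => x)).getD 0
    let st := (PySem.List.pyRange 0 (i + 1) 1).foldl
      (fun (st : List Int × Int) j =>
        let cur := PySem.List.pySetD st.1 j (PySem.List.pyGetD st.1 j 0 + st.2)
        (cur, max (PySem.List.pyGetD cur j 0) st.2))
      (currNums, currMaxV)
    res ++ [PySem.Int.mod st.1.sum pvBase]) []

-- ===== PORT B =====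
-- literal transliteration of Source B: one pass over enumerate(arr) with state (res, m, s, p, t)
def getPrefixScores2_alt (arr : List Int) : List Int :=
  ((PySem.List.enumerate arr 0).foldl
    (fun (st : List Int × Option Int × Int × Int × Int) ix =>
      let i := ix.1
      let x := ix.2
      let m := match st.2.1 with
        | none => x
        | some m0 => max m0 x
      let s := st.2.2.1 + x
      let t := st.2.2.2.2 + st.2.2.2.1
      let p := st.2.2.2.1 + max x 0
      (st.1 ++ [PySem.Int.mod (s + (i + 1) * m + t) pvBase], some m, s, p, t))
    ([], none, 0, 0, 0)).1

-- ===== PRECONDITION & SPEC =====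
def Spec_getPrefixScores2 (arr : List Int) (out : List Int) : Prop := out = getPrefixScores2_alt arr
instance (arr : List Int) (out : List Int) : Decidable (Spec_getPrefixScores2 arr out) := by unfold Spec_getPrefixScores2; infer_instance

-- ===== CLAIM (what is proved, stated in full; the proofs are below) =====
def Claim_equal_getPrefixScores2 : Prop := ∀ (arr : List Int), Dom_getPrefixScores2 arr → Spec_getPrefixScores2 arr (getPrefixScores2 arr)

-- ===== LEMMAS AND PROOFS =====

-- sum of max(v,0) over a list
def pvPos (xs : List Int) : Int := (xs.map (fun x => max x 0)).sum

-- pvT xs = Σ_j (number of later positions) * max(xs_j, 0) = Σ_j pvPos (xs.take j)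
def pvT : List Int → Int
  | [] => 0
  | x :: r => (r.length : Int) * max x 0 + pvT r

-- max(xs) of a nonempty list, as the running-max loop
def pvPrefMax : List Int → Int
  | [] => 0
  | x :: t => t.foldl max x

def pvMaxOpt : List Int → Option Int
  | [] => none
  | x :: t => some (pvPrefMax (x :: t))

-- the closed form both programs compute for one prefix q
def pvEntry (q : List Int) : Int :=
  PySem.Int.mod (q.sum + (q.length : Int) * pvPrefMax q + pvT q) pvBase

def pvRef (arr : List Int) : List Int :=
  (List.range arr.length).map (fun i => pvEntry (arr.take (i + 1)))

-- the list produced by A's inner mutation loop, and its final running max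
def pvTransf : List Int → Int → List Int
  | [], _ => []
  | x :: r, m => (x + m) :: pvTransf r (max (x + m) m)

def pvFinalMax : List Int → Int → Int
  | [], m => m
  | x :: r, m => pvFinalMax r (max (x + m) m)

-- A's inner loop, characterized for an arbitrary split done ++ todo
theorem pvInner (todo done : List Int) (m : Int) :
    (PySem.List.pyRange (done.length : Int) ((done.length : Int) + (todo.length : Int)) 1).foldl
      (fun (st : List Int × Int) j =>
        let cur := PySem.List.pySetD st.1 j (PySem.List.pyGetD st.1 j 0 + st.2)
        (cur, max (PySem.List.pyGetD cur j 0) st.2))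
      (done ++ todo, m)
    = (done ++ pvTransf todo m, pvFinalMax todo m) := by
  induction todo generalizing done m with
  | nil => simp [pvTransf, pvFinalMax]
  | cons x r ih =>
    have hlt : (done.length : Int) < (done.length : Int) + ((x :: r).length : Int) := by
      simp only [List.length_cons]; push_cast; omega
    rw [PySem.List.pyRange_one_cons hlt]
    simp only [List.foldl_cons]
    have hget : PySem.List.pyGetD (done ++ x :: r) (done.length : Int) 0 = x := by
      simp [List.getD]
    have hset : PySem.List.pySetD (done ++ x :: r) (done.length : Int) (x + m) = done ++ (x + m) :: r := by
      simp
    have hget2 : PySem.List.pyGetD (done ++ (x + m) :: r) (done.length : Int) 0 = x + m := by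
      simp [List.getD]
    simp only [hget, hset, hget2]
    have := ih (done ++ [x + m]) (max (x + m) m)
    simp only [List.append_assoc, List.cons_append, List.nil_append, List.length_append,
      List.length_cons, List.length_nil] at this ⊢
    push_cast at this ⊢
    rw [show (done.length : Int) + 1 + (r.length : Int) = (done.length : Int) + ((r.length : Int) + 1) by ring] at this
    rw [this]
    simp [pvTransf, pvFinalMax]

theorem pvTransf_sum (todo : List Int) (m : Int) :
    (pvTransf todo m).sum = todo.sum + (todo.length : Int) * m + pvT todo := by
  induction todo generalizing m with
  | nil => simp [pvTransf, pvT]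
  | cons x r ih =>
    have hmax : max (x + m) m = m + max x 0 := by omega
    simp [pvTransf, pvT, ih, hmax]
    ring

-- A equals the reference list of per-prefix closed forms
theorem pvA_eq_ref (arr : List Int) : getPrefixScores2 arr = pvRef arr := by
  unfold getPrefixScores2 pvRef
  rw [PySem.List.foldl_append_singleton_eq_map]
  rw [PySem.List.pyRange_zero_natCast]
  rw [List.map_map, List.nil_append]
  apply List.map_congr_left
  intro i hi
  rw [List.mem_range] at hi
  simp only [Function.comp_apply]
  have hslice : PySem.List.slice arr none (some ((i : Int) + 1)) = arr.take (i + 1) := by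
    rw [show ((i : Int) + 1) = ((i + 1 : Nat) : Int) by push_cast; ring,
      PySem.List.slice_to_natCast]
  rw [hslice]
  have hlen : (arr.take (i + 1)).length = i + 1 := by
    rw [List.length_take]; omega
  obtain ⟨a, t, hq⟩ : ∃ a t, arr.take (i + 1) = a :: t := by
    cases h : arr.take (i + 1) with
    | nil => rw [h] at hlen; simp at hlen
    | cons a t => exact ⟨a, t, rfl⟩
  rw [hq]
  rw [PySem.List.max?_id_cons, Option.getD_some]
  have hrange : (i : Int) + 1 = (((([] : List Int)).length : Int) + (((a :: t).length : Int))) := by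
    rw [hq] at hlen
    simp only [List.length_nil, List.length_cons] at *
    push_cast; omega
  rw [show (PySem.List.pyRange 0 ((i:Int) + 1) 1) = PySem.List.pyRange (((([] : List Int)).length : Int)) ((((([] : List Int)).length : Int)) + (((a :: t).length : Int))) 1 by
    rw [← hrange]; norm_num]
  rw [show ((a :: t : List Int), t.foldl max a) = ((([] : List Int)) ++ (a :: t), t.foldl max a) by simp]
  rw [pvInner]
  simp only [List.nil_append]
  rw [pvTransf_sum]
  simp [pvEntry, pvPrefMax]

theorem pvPos_append (xs : List Int) (x : Int) :
    pvPos (xs ++ [x]) = pvPos xs + max x 0 := by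
  simp [pvPos]

theorem pvT_append (xs : List Int) (x : Int) :
    pvT (xs ++ [x]) = pvT xs + pvPos xs := by
  induction xs with
  | nil => simp [pvT, pvPos]
  | cons a r ih => simp [pvT, ih, pvPos]; ring

theorem pvPrefMax_append (xs : List Int) (x : Int) (h : xs ≠ []) :
    pvPrefMax (xs ++ [x]) = max (pvPrefMax xs) x := by
  cases xs with
  | nil => simp at h
  | cons a t => simp [pvPrefMax, List.foldl_append]

theorem pvRef_append (arr : List Int) (x : Int) :
    pvRef (arr ++ [x]) = pvRef arr ++ [pvEntry (arr ++ [x])] := by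
  unfold pvRef
  simp only [List.length_append, List.length_cons, List.length_nil]
  rw [show arr.length + (0 + 1) = arr.length + 1 by omega, List.range_succ, List.map_append]
  congr 1
  · apply List.map_congr_left
    intro i hi
    rw [List.mem_range] at hi
    rw [List.take_append_of_le_length (by omega)]
  · simp only [List.map_cons, List.map_nil, List.cons.injEq, and_true]
    rw [List.take_of_length_le (by simp)]

-- B's fold state after consuming the whole list
theorem pvB_state (arr : List Int) :
    (PySem.List.enumerate arr 0).foldl
      (fun (st : List Int × Option Int × Int × Int × Int) ix =>
        let i := ix.1
        let x := ix.2
        let m := match st.2.1 with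
          | none => x
          | some m0 => max m0 x
        let s := st.2.2.1 + x
        let t := st.2.2.2.2 + st.2.2.2.1
        let p := st.2.2.2.1 + max x 0
        (st.1 ++ [PySem.Int.mod (s + (i + 1) * m + t) pvBase], some m, s, p, t))
      ([], none, 0, 0, 0)
    = (pvRef arr, pvMaxOpt arr, arr.sum, pvPos arr, pvT arr) := by
  induction arr using List.reverseRecOn with
  | nil => simp [pvRef, pvPos, pvT, pvMaxOpt]
  | append_singleton l x ih =>
    rw [PySem.List.enumerate_append, List.foldl_append, ih]
    simp only [PySem.List.enumerate_cons, PySem.List.enumerate_nil, List.foldl_cons, List.foldl_nil]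
    have hm : (match pvMaxOpt l with
        | none => x
        | some m0 => max m0 x) = pvPrefMax (l ++ [x]) := by
      cases l with
      | nil => simp [pvPrefMax, pvMaxOpt]
      | cons a t => rw [pvMaxOpt]; rw [pvPrefMax_append _ _ (by simp)]
    simp only [hm]
    have hmx : pvMaxOpt (l ++ [x]) = some (pvPrefMax (l ++ [x])) := by
      cases h2 : l ++ [x] with
      | nil => simp at h2
      | cons b u => rw [pvMaxOpt, ← h2]
    rw [hmx]
    refine Prod.ext ?_ (Prod.ext ?_ (Prod.ext ?_ (Prod.ext ?_ ?_))) <;> simp only []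
    · rw [pvRef_append]
      congr 2
      rw [pvEntry, pvT_append]
      simp only [List.length_append, List.length_cons, List.length_nil, List.sum_append,
        List.sum_cons, List.sum_nil]
      push_cast
      ring_nf
    all_goals first
      | rfl
      | simp [pvPos_append, pvT_append]

theorem pvB_eq_ref (arr : List Int) : getPrefixScores2_alt arr = pvRef arr := by
  unfold getPrefixScores2_alt
  rw [pvB_state]

-- ===== VERDICT (by name: the statement is the Claim_ definition above) =====
theorem getPrefixScores2_spec : Claim_equal_getPrefixScores2 := by
  intro arr _
  unfold Spec_getPrefixScores2
  rw [pvA_eq_ref, pvB_eq_ref]
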